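-- pv_equiv track=rewrite | github.com/gabus/codewars | undefined/draw_diamond.py | fetch_row
-- ===== SOURCE A (Python) =====
-- def fetch_row(nth) -> list:
--     half = []
--     index = 1
--     for _ in range(nth):
--         half.append(index)
--         index += 1
--         if index >= 10:
--             index = 0
--
--     other_half = half[0:-1]
--     other_half.reverse()
--
--     return half + other_half
-- ===== SOURCE B (Python) =====
-- def fetch_row(nth) -> list:
--     # one pass over the full output; each element from its mirrored distance
--     return [((i if i < nth else 2 * nth - 2 - i) + 1) % 10 for i in range(2 * nth - 1)]
-- ===== Notes on version B (the rewrite author's own statement) =====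
-- stated objective: simpler
-- what changed: Replaces the build-half/slice/reverse/concatenate pipeline with a single left-to-right comprehension over range(2*nth-1) computing each cell as (mirror(i)+1) % 10.
import Mathlib
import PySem

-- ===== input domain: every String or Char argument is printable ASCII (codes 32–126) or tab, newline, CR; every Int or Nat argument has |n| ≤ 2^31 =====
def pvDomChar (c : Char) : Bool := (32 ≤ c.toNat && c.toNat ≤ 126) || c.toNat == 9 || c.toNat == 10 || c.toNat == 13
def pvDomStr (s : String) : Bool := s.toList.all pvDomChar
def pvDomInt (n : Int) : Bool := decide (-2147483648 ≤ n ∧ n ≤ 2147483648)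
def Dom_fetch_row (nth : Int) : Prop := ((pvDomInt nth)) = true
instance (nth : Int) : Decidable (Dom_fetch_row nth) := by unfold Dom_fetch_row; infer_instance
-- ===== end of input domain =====

-- B replaces the half-list build, slice, reverse and concatenation of A with one
-- left-to-right pass computing each cell from its mirrored distance (objective: simpler).

-- ===== PORT A =====
def fetch_row (nth : Int) : List Int :=
  let s := (PySem.List.pyRange 0 nth 1).foldl
    (fun (st : List Int × Int) _ =>
      let half := st.1 ++ [st.2]
      let index := st.2 + 1
      (half, if index ≥ 10 then 0 else index))
    ([], 1)
  let half := s.1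
  let other_half := (PySem.List.slice half (some 0) (some (-1))).reverse
  half ++ other_half

-- ===== PORT B =====
def fetch_row_alt (nth : Int) : List Int :=
  (PySem.List.pyRange 0 (2 * nth - 1) 1).map (fun i =>
    PySem.Int.mod ((if i < nth then i else 2 * nth - 2 - i) + 1) 10)

-- ===== PRECONDITION & SPEC =====
def Spec_fetch_row (nth : Int) (out : List Int) : Prop := out = fetch_row_alt nth
instance (nth : Int) (out : List Int) : Decidable (Spec_fetch_row nth out) := by unfold Spec_fetch_row; infer_instance

-- ===== CLAIM (what is proved, stated in full; the proofs are below) =====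
def Claim_equal_fetch_row : Prop := ∀ (nth : Int), Dom_fetch_row nth → Spec_fetch_row nth (fetch_row nth)

-- ===== LEMMAS AND PROOFS =====

def pvF (k : Int) : Int := (k + 1) % 10

def pvStepA (st : List Int × Int) (_ : Int) : List Int × Int :=
  (st.1 ++ [st.2], if st.2 + 1 ≥ 10 then 0 else st.2 + 1)

lemma pvF_succ (j : Int) : (if pvF j + 1 ≥ 10 then (0:Int) else pvF j + 1) = pvF (j + 1) := by
  unfold pvF
  omega

lemma pvFoldA (l : List Int) (acc : List Int) (j : Int) :
    l.foldl pvStepA (acc, pvF j)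
      = (acc ++ (List.range l.length).map (fun (k : Nat) => pvF (j + (k : Int))),
         pvF (j + (l.length : Int))) := by
  induction l generalizing acc j with
  | nil => simp
  | cons x l ih =>
      simp only [List.foldl_cons, pvStepA, pvF_succ j, ih (acc ++ [pvF j]) (j + 1)]
      rw [Prod.mk.injEq]
      refine ⟨?_, ?_⟩
      · rw [List.append_assoc, List.length_cons, List.range_succ_eq_map, List.map_cons,
          List.map_map]
        simp only [List.cons_append, List.nil_append, Int.natCast_zero, add_zero]
        congr 1
        congr 1
        refine List.map_congr_left (fun k _ => ?_)
        simp only [Function.comp_apply]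
        congr 1
        push_cast
        ring
      · congr 1
        simp only [List.length_cons]
        push_cast
        ring

lemma pvFetchA (nth : Int) :
    fetch_row nth
      = (List.range nth.toNat).map (fun (k : Nat) => pvF (k : Int))
        ++ (((List.range nth.toNat).map (fun (k : Nat) => pvF (k : Int))).dropLast).reverse := by
  unfold fetch_row
  have hstep : (fun (st : List Int × Int) (_ : Int) =>
      let half := st.1 ++ [st.2]
      let index := st.2 + 1
      (half, if index ≥ 10 then 0 else index)) = pvStepA := rfl
  have hf := pvFoldA (PySem.List.pyRange 0 nth 1) [] 0
  rw [show pvF 0 = (1:Int) from by decide] at hf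
  rw [hstep, hf]
  have hlen : (PySem.List.pyRange 0 nth 1).length = nth.toNat := by
    rw [PySem.List.length_pyRange_one]; congr 1; omega
  rw [hlen]
  simp only [List.nil_append, zero_add]
  rw [PySem.List.slice_zero_start, PySem.List.slice_to_neg_one]

lemma pvFetchB (nth : Int) :
    fetch_row_alt nth
      = (List.range (2 * nth - 1).toNat).map (fun (k : Nat) =>
          pvF (if (k : Int) < nth then (k : Int) else 2 * nth - 2 - (k : Int))) := by
  unfold fetch_row_alt
  rw [PySem.List.pyRange_one, List.map_map]
  have h : (2 * nth - 1 - 0).toNat = (2 * nth - 1).toNat := by omega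
  rw [h]
  refine List.map_congr_left (fun k _ => ?_)
  simp only [Function.comp_apply, zero_add, pvF]
  rw [PySem.Int.mod_eq_emod_of_pos]
  norm_num

-- ===== VERDICT (by name: the statement is the Claim_ definition above) =====
theorem fetch_row_spec : Claim_equal_fetch_row := by
  intro nth _
  show fetch_row nth = fetch_row_alt nth
  rw [pvFetchA, pvFetchB]
  by_cases h : nth ≤ 0
  · have h1 : nth.toNat = 0 := by omega
    have h2 : (2 * nth - 1).toNat = 0 := by omega
    simp [h1, h2]
  · replace h : 0 < nth := by omega
    set n := nth.toNat with hn
    have hnth : nth = (n : Int) := by omega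
    have hpos : 0 < n := by omega
    have hm : (2 * nth - 1).toNat = 2 * n - 1 := by omega
    rw [hm]
    apply List.ext_getElem
    · simp; omega
    · intro i hi1 hi2
      simp only [List.length_map, List.length_range] at hi2
      rcases Nat.lt_or_ge i n with hin | hin
      · rw [List.getElem_append_left (by simp [hin])]
        simp only [List.getElem_map, List.getElem_range]
        rw [if_pos (by rw [hnth]; exact_mod_cast hin)]
      · have hlen : ((List.range n).map (fun (k : Nat) => pvF (k : Int))).length = n := by simp
        rw [List.getElem_append_right (by omega)]
        simp only [hlen]
        rw [List.getElem_reverse]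
        simp only [List.getElem_dropLast, List.getElem_map, List.getElem_range,
          List.length_dropLast, List.length_map, List.length_range]
        rw [if_neg (by rw [hnth]; omega)]
        congr 1
        rw [hnth]
        omega
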